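-- pv_equiv track=rewrite | github.com/ASSERT-KTH/Mokav | experiments/pynguin/c4b/return-lst/generated_tests/src_1665/5/src_1665.py | func
-- ===== SOURCE A (Python) =====
-- def func(*args):
-- 	ret_values = []
--
-- 	s = args[0]
-- 	(k, n, z) = (0, (len(s) // 2), len(s))
-- 	for i in range(n):
-- 	    if (s[i] != s[((z - i) - 1)]):
-- 	        k += 1
-- 	if (k == 1):
-- 	    ret_values.append('YES')
-- 	elif ((k == 0) and ((z % 2) == 1)):
-- 	    ret_values.append('YES')
-- 	else:
-- 	    ret_values.append('NO')
--
-- 	return ret_values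
-- ===== SOURCE B (Python) =====
-- def func(*args):
--     s = args[0]
--     i, j = 0, len(s) - 1
--     while i < j and s[i] == s[j]:
--         i += 1
--         j -= 1
--     if i >= j:
--         return ['YES' if len(s) % 2 == 1 else 'NO']
--     t = s[i + 1:j]
--     return ['YES' if t == t[::-1] else 'NO']
-- ===== Notes on version B (the rewrite author's own statement) =====
-- stated objective: faster
-- what changed: B replaces A's count-all-mismatches index loop with an early-exit two-pointer scan to the first mismatching pair, then decides the verdict by a palindrome test (t == t[::-1]) on the inner substring between that pair, instead of counting mismatches.
import Mathlib
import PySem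

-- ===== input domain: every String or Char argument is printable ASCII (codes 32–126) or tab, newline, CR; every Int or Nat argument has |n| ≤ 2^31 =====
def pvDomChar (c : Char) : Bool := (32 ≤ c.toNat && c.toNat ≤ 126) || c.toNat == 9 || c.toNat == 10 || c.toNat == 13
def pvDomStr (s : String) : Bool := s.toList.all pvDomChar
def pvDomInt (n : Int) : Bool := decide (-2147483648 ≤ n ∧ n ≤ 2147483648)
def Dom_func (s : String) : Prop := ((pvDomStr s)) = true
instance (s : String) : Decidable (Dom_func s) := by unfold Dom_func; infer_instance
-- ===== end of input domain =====

-- B replaces A's count-all-mismatches loop by an early-exit two-pointer scan to the first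
-- mismatching pair plus a palindrome test on the inner substring (timing run measured B faster; the proof is return-value equality on Dom).

-- ===== PORT A =====
-- Literal port of A: loop i in range(len(s)//2), compare s[i] with s[z-i-1], count mismatches k.
def func (s : String) : List String :=
  let l := s.toList
  let z : Int := l.length
  let n : Int := PySem.Int.floordiv z 2
  let k : Int := (PySem.List.pyRange 0 n 1).foldl
      (fun k i => if PySem.List.pyGet? l i ≠ PySem.List.pyGet? l (z - i - 1) then k + 1 else k) 0
  if k = 1 then ["YES"]
  else if k = 0 ∧ PySem.Int.mod z 2 = 1 then ["YES"]
  else ["NO"]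

-- ===== PORT B =====
-- B's while loop: advance i, retreat j while s[i] == s[j]
def pvScan (l : List Char) (i j : Int) : Int × Int :=
  if h : i < j ∧ PySem.List.pyGet? l i = PySem.List.pyGet? l j then
    pvScan l (i + 1) (j - 1)
  else (i, j)
termination_by (j - i).toNat
decreasing_by
  have := h.1; omega

-- Literal port of B: two-pointer scan to the first mismatching pair; if none, parity of len(s);
-- otherwise check the inner substring t = s[i+1:j] against its reverse ([::-1] = reverse).
def func_alt (s : String) : List String :=
  let l := s.toList
  let z : Int := l.length
  let p := pvScan l 0 (z - 1)
  if p.1 ≥ p.2 then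
    [if PySem.Int.mod z 2 = 1 then "YES" else "NO"]
  else
    let t := PySem.List.slice l (some (p.1 + 1)) (some p.2)
    [if t = t.reverse then "YES" else "NO"]

-- ===== PRECONDITION & SPEC =====
def Spec_func (s : String) (out : List String) : Prop := out = func_alt s
instance (s : String) (out : List String) : Decidable (Spec_func s out) := by unfold Spec_func; infer_instance

-- ===== CLAIM (what is proved, stated in full; the proofs are below) =====
def Claim_equal_func : Prop := ∀ (s : String), Dom_func s → Spec_func s (func s)

-- ===== LEMMAS AND PROOFS =====

-- the mirror-mismatch predicate at natural index i
def pvP (l : List Char) (i : Nat) : Bool :=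
  decide (l.getD i ' ' ≠ l.getD (l.length - 1 - i) ' ')

lemma pvP_false_iff (l : List Char) (i : Nat) :
    pvP l i = false ↔ l.getD i ' ' = l.getD (l.length - 1 - i) ' ' := by
  unfold pvP; simp

-- A's foldl counts mismatches over the first half
lemma A_count (l : List Char) :
    (PySem.List.pyRange 0 (PySem.Int.floordiv (l.length : Int) 2) 1).foldl
      (fun k i => if PySem.List.pyGet? l i ≠ PySem.List.pyGet? l ((l.length : Int) - i - 1) then k + 1 else k) (0 : Int)
      = ((List.range (l.length / 2)).countP (pvP l) : Int) := by
  set n := l.length with hn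
  set q := n / 2 with hq
  have hfd : PySem.Int.floordiv (n : Int) 2 = ((q : Nat) : Int) := by
    exact_mod_cast PySem.Int.floordiv_natCast n 2
  rw [hfd, PySem.List.foldl_ite_add_one, PySem.List.pyRange_one]
  have hnat : ((q : Int) - 0).toNat = q := by omega
  rw [hnat, List.countP_map, zero_add]
  refine congrArg Nat.cast (List.countP_congr ?_)
  intro i hi
  simp only [List.mem_range] at hi
  have hin : i < n := by omega
  have hin2 : n - 1 - i < n := by omega
  have hg1 : PySem.List.pyGet? l ((0 : Int) + (i : Nat)) = some l[i] := by
    rw [zero_add]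
    simp [List.getElem?_eq_getElem hin]
  have hc : (n : Int) - ((0 : Int) + (i : Nat)) - 1 = ((n - 1 - i : Nat) : Int) := by
    omega
  have hg2 : PySem.List.pyGet? l ((n : Int) - ((0 : Int) + (i : Nat)) - 1) = some l[n - 1 - i] := by
    rw [hc]
    simp [List.getElem?_eq_getElem hin2]
  simp only [Function.comp_apply, hg1, hg2, pvP]
  simp [← hn, List.getElem?_eq_getElem hin, List.getElem?_eq_getElem hin2]

lemma pvGet (l : List Char) (i : Nat) (h : i < l.length) :
    PySem.List.pyGet? l (i : Int) = some (l.getD i ' ') := by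
  simp [PySem.List.pyGet?_natCast, List.getElem?_eq_getElem h]

lemma pvGetMirror (l : List Char) (i : Nat) (h : i < l.length) :
    PySem.List.pyGet? l ((l.length : Int) - 1 - i) = some (l.getD (l.length - 1 - i) ' ') := by
  have hc : (l.length : Int) - 1 - i = ((l.length - 1 - i : Nat) : Int) := by omega
  rw [hc]
  exact pvGet l _ (by omega)

-- a clean scan runs to the middle
lemma scan_clean (l : List Char) (hall : ∀ j, j < l.length / 2 → pvP l j = false) :
    ∀ fuel i : Nat, l.length / 2 - i ≤ fuel → i ≤ l.length / 2 →
      (pvScan l (i : Int) ((l.length : Int) - 1 - i)).1 ≥ (pvScan l (i : Int) ((l.length : Int) - 1 - i)).2 := by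
  set n := l.length with hn
  intro fuel
  induction fuel with
  | zero =>
      intro i hfi hi
      have hiq : i = n / 2 := by omega
      rw [pvScan, dif_neg]
      · simp; omega
      · rintro ⟨h1, -⟩; omega
  | succ fuel ih =>
      intro i hfi hi
      rw [pvScan]
      split
      · next h =>
          have hlt : i < n / 2 := by have := h.1; omega
          have e1 : (i : Int) + 1 = ((i + 1 : Nat) : Int) := by omega
          have e2 : (n : Int) - 1 - i - 1 = (n : Int) - 1 - ((i + 1 : Nat) : Int) := by omega
          rw [e1, e2]
          exact ih (i + 1) (by omega) (by omega)
      · next h =>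
          simp only [ge_iff_le]
          by_contra hge
          apply h
          have hlt : (i : Int) < (n : Int) - 1 - i := by omega
          have hiq : i < n / 2 := by omega
          refine ⟨hlt, ?_⟩
          rw [pvGet l i (by omega), pvGetMirror l i (by omega)]
          exact congrArg some ((pvP_false_iff l i).mp (hall i hiq))

-- the scan stops at the first mismatch m
lemma scan_mismatch (l : List Char) (m : Nat) (hm : m < l.length / 2)
    (hpre : ∀ j, j < m → pvP l j = false) (hmm : pvP l m = true) :
    ∀ fuel i : Nat, m - i ≤ fuel → i ≤ m →
      pvScan l (i : Int) ((l.length : Int) - 1 - i) = ((m : Int), (l.length : Int) - 1 - m) := by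
  set n := l.length with hn
  intro fuel
  induction fuel with
  | zero =>
      intro i hfi hi
      have him : i = m := by omega
      subst him
      rw [pvScan, dif_neg]
      rintro ⟨-, heq⟩
      rw [pvGet l i (by omega), pvGetMirror l i (by omega)] at heq
      have := Option.some.inj heq
      unfold pvP at hmm
      simp at hmm
      exact hmm this
  | succ fuel ih =>
      intro i hfi hi
      rcases Nat.lt_or_ge i m with hlt | hge
      · rw [pvScan, dif_pos]
        · have e1 : (i : Int) + 1 = ((i + 1 : Nat) : Int) := by omega
          have e2 : (n : Int) - 1 - i - 1 = (n : Int) - 1 - ((i + 1 : Nat) : Int) := by omega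
          rw [e1, e2]
          exact ih (i + 1) (by omega) (by omega)
        · refine ⟨by omega, ?_⟩
          rw [pvGet l i (by omega), pvGetMirror l i (by omega)]
          exact congrArg some ((pvP_false_iff l i).mp (hpre i hlt))
      · have him : i = m := by omega
        subst him
        rw [pvScan, dif_neg]
        rintro ⟨-, heq⟩
        rw [pvGet l i (by omega), pvGetMirror l i (by omega)] at heq
        have := Option.some.inj heq
        unfold pvP at hmm
        simp at hmm
        exact hmm this

-- palindrome test on the inner substring ↔ no further mismatch
lemma pal_iff (l : List Char) (m : Nat) (hm : m < l.length / 2) :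
    (((l.drop (m + 1)).take (l.length - 1 - m - (m + 1))
        = ((l.drop (m + 1)).take (l.length - 1 - m - (m + 1))).reverse)
      ↔ (∀ j, m < j → j < l.length / 2 → pvP l j = false)) := by
  set n := l.length with hn
  have hn2 : 2 * m + 2 ≤ n := by omega
  set t := (l.drop (m + 1)).take (n - 1 - m - (m + 1)) with ht
  have hL : t.length = n - 2 * m - 2 := by
    simp [ht]; omega
  have hgetE : ∀ (i' : Nat) (h : i' < t.length), t[i'] = l.getD (m + 1 + i') ' ' := by
    intro i' h
    rw [hL] at h
    have hin : m + 1 + i' < n := by omega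
    rw [List.getD_eq_getElem l ' ' hin]
    simp [ht]
  -- step 1: reverse equality ↔ pointwise mirror equality
  have step1 : (t = t.reverse) ↔ ∀ (i' : Nat) (h : i' < t.length), t[i'] = t[t.length - 1 - i']'(by omega) := by
    constructor
    · intro h i' hi
      rw [List.getElem_of_eq h hi, List.getElem_reverse]
    · intro h
      apply List.ext_getElem (by simp)
      intro i h1 h2
      rw [List.getElem_reverse]
      exact h i h1
  rw [step1]
  constructor
  · intro h j hj1 hj2
    have hi' : j - m - 1 < t.length := by rw [hL]; omega
    have := h (j - m - 1) hi'
    rw [hgetE _ hi', hgetE _ (by omega)] at this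
    have e1 : m + 1 + (j - m - 1) = j := by omega
    have e2 : m + 1 + (t.length - 1 - (j - m - 1)) = n - 1 - j := by rw [hL]; omega
    rw [e1, e2] at this
    rw [pvP_false_iff]
    exact this
  · intro h i' hi'
    rw [hgetE _ hi', hgetE _ (by omega)]
    have e2 : m + 1 + (t.length - 1 - i') = n - 1 - (m + 1 + i') := by rw [hL]; rw [hL] at hi'; omega
    rw [e2]
    set j := m + 1 + i' with hj
    have hjlt : j ≤ n - m - 2 := by rw [hL] at hi'; omega
    rcases Nat.lt_or_ge j (n / 2) with h1 | h1
    · exact (pvP_false_iff l j).mp (h j (by omega) h1)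
    · by_cases heq : j = n - 1 - j
      · rw [← heq]
      · have hj' : n - 1 - j < n / 2 := by omega
        have hmj' : m < n - 1 - j := by omega
        have := (pvP_false_iff l (n - 1 - j)).mp (h (n - 1 - j) hmj' hj')
        have e3 : n - 1 - (n - 1 - j) = j := by omega
        rw [e3] at this
        exact this.symm

lemma func_eq_alt (s : String) : func s = func_alt s := by
  unfold func func_alt
  dsimp only
  set l := s.toList with hl
  rw [A_count l]
  by_cases hall : ∀ j, j < l.length / 2 → pvP l j = false
  · -- no mismatch: k = 0, scan exits at the middle, both answer by parity
    have hk : (List.range (l.length / 2)).countP (pvP l) = 0 := by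
      rw [List.countP_eq_zero]
      intro j hj
      simp [hall j (List.mem_range.mp hj)]
    have hscan := scan_clean l hall (l.length / 2) 0 (by omega) (by omega)
    simp only [Nat.cast_zero, sub_zero] at hscan
    rw [if_pos hscan, hk]
    norm_num
    split_ifs <;> rfl
  · -- first mismatch at m = Nat.find he
    have he : ∃ j, j < l.length / 2 ∧ pvP l j = true := by
      push Not at hall
      obtain ⟨j, hj1, hj2⟩ := hall
      exact ⟨j, hj1, by simpa using hj2⟩
    obtain ⟨hm1, hm2⟩ := Nat.find_spec he
    set m := Nat.find he with hmdef
    have hpre : ∀ j, j < m → pvP l j = false := by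
      intro j hj
      have hmin := Nat.find_min he hj
      push Not at hmin
      have := hmin (by omega)
      simpa using this
    clear_value m
    have hscan := scan_mismatch l m hm1 hpre hm2 m 0 (by omega) (by omega)
    simp only [Nat.cast_zero, sub_zero] at hscan
    rw [hscan]
    dsimp only
    rw [if_neg (show ¬((m : Int) ≥ (l.length : Int) - 1 - (m : Int)) from by omega)]
    have e1 : (m : Int) + 1 = ((m + 1 : Nat) : Int) := by omega
    have e2 : (l.length : Int) - 1 - (m : Int) = ((l.length - 1 - m : Nat) : Int) := by omega
    rw [e1, e2, PySem.List.slice_natCast]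
    have hpal := pal_iff l m hm1
    have hcnt : (List.range (l.length / 2)).countP (pvP l)
        = 1 + (List.range (l.length / 2 - (m + 1))).countP (fun j => pvP l (m + 1 + j)) := by
      conv_lhs => rw [show l.length / 2 = (m + 1) + (l.length / 2 - (m + 1)) from by omega]
      rw [List.range_add, List.countP_append, List.countP_map]
      have h1 : (List.range (m + 1)).countP (pvP l) = 1 := by
        rw [List.range_succ, List.countP_append, List.countP_eq_zero.mpr (by
          intro j hj
          simp [hpre j (List.mem_range.mp hj)])]
        simp [hm2]
      rw [h1]
      rfl
    set c := (List.range (l.length / 2 - (m + 1))).countP (fun j => pvP l (m + 1 + j)) with hcdef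
    have hiff : ((l.drop (m + 1)).take (l.length - 1 - m - (m + 1))
        = ((l.drop (m + 1)).take (l.length - 1 - m - (m + 1))).reverse) ↔ c = 0 := by
      rw [hpal]
      constructor
      · intro h
        rw [hcdef, List.countP_eq_zero]
        intro j hj
        have hj' := List.mem_range.mp hj
        simp [h (m + 1 + j) (by omega) (by omega)]
      · intro h j hjm hjq
        have := List.countP_eq_zero.mp (hcdef ▸ h) (j - (m + 1)) (List.mem_range.mpr (by omega))
        have e : m + 1 + (j - (m + 1)) = j := by omega
        rw [e] at this
        simpa using this
    rw [hcnt]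
    by_cases hc : c = 0
    · rw [hc, if_pos (hiff.mpr hc)]
      norm_num
    · rw [if_neg (show ¬(((1 + c : Nat) : Int) = 1) from by push_cast; omega),
          if_neg (show ¬(((1 + c : Nat) : Int) = 0 ∧ PySem.Int.mod (l.length : Int) 2 = 1) from by
            rintro ⟨h, -⟩; push_cast at h; omega),
          if_neg (fun h => hc (hiff.mp h))]

-- ===== VERDICT (by name: the statement is the Claim_ definition above) =====
theorem func_spec : Claim_equal_func := by
  intro s _
  unfold Spec_func
  exact func_eq_alt s
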